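-- pv_equiv track=rewrite | github.com/uh-joan/bioclaw | container/skills/drug-sales-forecasting/scripts/market_sizing.py | _fuzzy_match_measure
-- ===== SOURCE A (Python) =====
-- from typing import Dict, Any, Optional, List, Tuple
--
-- def _fuzzy_match_measure(indication: str, measures: List[Dict]) -> Optional[str]:
--     """
--     Find the best matching CDC measure for an indication using fuzzy matching.
--
--     Args:
--         indication: Disease/condition name
--         measures: List of CDC measure dicts with 'measureid' and 'measure' keys
--
--     Returns:
--         str: Best matching measureid or None
--     """
--     if not indication or not measures:
--         return None
--
--     indication_lower = indication.lower()
--     indication_words = set(indication_lower.split())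
--
--     best_match = None
--     best_score = 0
--
--     for m in measures:
--         measure_id = m.get('measureid', '')
--         measure_name = m.get('measure', '').lower()
--
--         # Skip non-disease measures (screenings, social determinants, behaviors)
--         skip_keywords = ['screening', 'checkup', 'insurance', 'dentist', 'mammography',
--                          'transportation', 'housing', 'food stamp', 'utility', 'loneliness',
--                          'emotional', 'leisure']
--         if any(kw in measure_name for kw in skip_keywords):
--             continue
--
--         score = 0
--
--         # Exact measureid match in indication (e.g., "diabetes" matches "DIABETES")
--         if measure_id.lower() in indication_lower:
--             score += 100
--
--         # Exact indication match in measure name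
--         if indication_lower in measure_name:
--             score += 80
--
--         # Word overlap scoring
--         measure_words = set(measure_name.split())
--         common_words = indication_words & measure_words
--         # Exclude common words like "among", "adults", "the", "of"
--         stopwords = {'among', 'adults', 'the', 'of', 'in', 'or', 'and', 'with', 'aged', 'years'}
--         meaningful_common = common_words - stopwords
--         score += len(meaningful_common) * 20
--
--         # Partial word matching (e.g., "diabetic" matches "diabetes")
--         for ind_word in indication_words - stopwords:
--             for meas_word in measure_words - stopwords:
--                 if len(ind_word) > 3 and len(meas_word) > 3:
--                     if ind_word[:4] == meas_word[:4]:  # Same prefix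
--                         score += 15
--
--         if score > best_score:
--             best_score = score
--             best_match = measure_id
--
--     # Only return if we have a reasonable match
--     return best_match if best_score >= 15 else None
-- ===== SOURCE B (Python) =====
-- from typing import Dict, Optional, List
--
--
-- def _fuzzy_match_measure(indication: str, measures: List[Dict]) -> Optional[str]:
--     """Histogram-based rewrite: the prefix bonus is computed from a Counter of
--     4-char prefixes of the indication's meaningful words instead of a nested
--     word-pair scan, and the winner is picked with max() over a scored list."""
--     if not indication or not measures:
--         return None
--
--     skip_keywords = ['screening', 'checkup', 'insurance', 'dentist', 'mammography',
--                      'transportation', 'housing', 'food stamp', 'utility', 'loneliness',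
--                      'emotional', 'leisure']
--     stopwords = {'among', 'adults', 'the', 'of', 'in', 'or', 'and', 'with', 'aged', 'years'}
--
--     indication_lower = indication.lower()
--     indication_words = set(indication_lower.split())
--
--     # Counter of 4-char prefixes of the indication's meaningful long words.
--     long_words = [w for w in indication_words - stopwords if len(w) > 3]
--     prefix_counts = {}
--     for w in long_words:
--         p = w[:4]
--         prefix_counts[p] = prefix_counts.get(p, 0) + 1
--
--     scored = []
--     for m in measures:
--         measure_id = m.get('measureid', '')
--         measure_name = m.get('measure', '').lower()
--         if any(kw in measure_name for kw in skip_keywords):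
--             continue
--         measure_words = set(measure_name.split())
--         score = 0
--         if measure_id.lower() in indication_lower:
--             score += 100
--         if indication_lower in measure_name:
--             score += 80
--         score += 20 * len((indication_words & measure_words) - stopwords)
--         long_meas = [v for v in measure_words - stopwords if len(v) > 3]
--         score += 15 * sum(prefix_counts.get(v[:4], 0) for v in long_meas)
--         scored.append((score, measure_id))
--
--     best = max(scored, key=lambda t: t[0], default=(0, None))
--     return best[1] if best[0] >= 15 else None
-- ===== Notes on version B (the rewrite author's own statement) =====
-- stated objective: alternative
-- what changed: The nested indication-word x measure-word prefix scan is replaced by a prefix Counter (dict of 4-char prefixes of the indication's meaningful long words) built once and looked up per measure word, and the running best_score/best_match tracker is replaced by building a scored list and taking max(scored, key=score, default=(0, None)).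
import Mathlib
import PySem

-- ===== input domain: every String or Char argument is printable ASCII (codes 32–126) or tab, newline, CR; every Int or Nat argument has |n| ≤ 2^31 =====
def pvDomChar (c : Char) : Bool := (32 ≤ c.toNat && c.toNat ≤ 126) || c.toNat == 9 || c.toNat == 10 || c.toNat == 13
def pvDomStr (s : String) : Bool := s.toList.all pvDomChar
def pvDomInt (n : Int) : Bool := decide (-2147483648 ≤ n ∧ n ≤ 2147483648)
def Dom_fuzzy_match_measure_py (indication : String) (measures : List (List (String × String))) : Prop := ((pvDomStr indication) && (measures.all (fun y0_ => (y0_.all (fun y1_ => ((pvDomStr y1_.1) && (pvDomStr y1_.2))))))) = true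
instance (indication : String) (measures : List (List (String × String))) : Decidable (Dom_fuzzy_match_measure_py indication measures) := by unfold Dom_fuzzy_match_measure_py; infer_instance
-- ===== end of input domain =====

-- B replaces the nested word-pair prefix scan with a prefix-Counter dict built once
-- and picks the winner with max() over a scored list (alternative decomposition, same values).


-- shared literal constants of the Python source
def pvSkip : List String :=
  ["screening", "checkup", "insurance", "dentist", "mammography",
   "transportation", "housing", "food stamp", "utility", "loneliness",
   "emotional", "leisure"]
def pvStop : PySem.Set String :=
  PySem.Set.ofList ["among", "adults", "the", "of", "in", "or", "and", "with", "aged", "years"]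

-- ===== PORT A =====
def fuzzy_match_measure_py (indication : String) (measures : List (List (String × String))) : Option String :=
  if indication = "" ∨ measures = [] then none
  else
    let indication_lower := PySem.Str.lower indication
    let indication_words : PySem.Set String := PySem.Set.ofList (PySem.Str.split₀ indication_lower)
    let r := measures.foldl (fun (st : Int × Option String) m =>
      let measure_id := (PySem.Dict.mk m).getD "measureid" ""
      let measure_name := PySem.Str.lower ((PySem.Dict.mk m).getD "measure" "")
      if pvSkip.any (fun kw => PySem.Str.isIn kw measure_name) then st
      else
        let score0 : Int := if PySem.Str.isIn (PySem.Str.lower measure_id) indication_lower then 100 else 0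
        let score1 : Int := if PySem.Str.isIn indication_lower measure_name then score0 + 80 else score0
        let measure_words : PySem.Set String := PySem.Set.ofList (PySem.Str.split₀ measure_name)
        let meaningful_common := PySem.Set.diff (PySem.Set.inter indication_words measure_words) pvStop
        let score2 : Int := score1 + (PySem.Set.len meaningful_common) * 20
        let score : Int := (PySem.Set.diff indication_words pvStop).foldl (fun s ind_word =>
            (PySem.Set.diff measure_words pvStop).foldl (fun s meas_word =>
              if PySem.Str.len ind_word > 3 ∧ PySem.Str.len meas_word > 3 then
                if PySem.Str.slice ind_word none (some 4) = PySem.Str.slice meas_word none (some 4) then s + 15 else s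
              else s) s) score2
        if st.1 < score then (score, some measure_id) else st) ((0 : Int), (none : Option String))
    if 15 ≤ r.1 then r.2 else none

-- ===== PORT B =====
def fuzzy_match_measure_py_alt (indication : String) (measures : List (List (String × String))) : Option String :=
  if indication = "" ∨ measures = [] then none
  else
    let indication_lower := PySem.Str.lower indication
    let indication_words : PySem.Set String := PySem.Set.ofList (PySem.Str.split₀ indication_lower)
    let long_words := (PySem.Set.diff indication_words pvStop).filter (fun w => decide (PySem.Str.len w > 3))
    let prefix_counts : PySem.Dict String Int :=
      long_words.foldl (fun d w =>
        let p := PySem.Str.slice w none (some 4)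
        d.insert p (d.getD p 0 + 1)) PySem.Dict.empty
    let scored : List (Int × Option String) := measures.foldl (fun acc m =>
      let measure_id := (PySem.Dict.mk m).getD "measureid" ""
      let measure_name := PySem.Str.lower ((PySem.Dict.mk m).getD "measure" "")
      if pvSkip.any (fun kw => PySem.Str.isIn kw measure_name) then acc
      else
        let measure_words : PySem.Set String := PySem.Set.ofList (PySem.Str.split₀ measure_name)
        let long_meas := (PySem.Set.diff measure_words pvStop).filter (fun v => decide (PySem.Str.len v > 3))
        let score : Int :=
          (if PySem.Str.isIn (PySem.Str.lower measure_id) indication_lower then 100 else 0)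
          + (if PySem.Str.isIn indication_lower measure_name then 80 else 0)
          + 20 * PySem.Set.len (PySem.Set.diff (PySem.Set.inter indication_words measure_words) pvStop)
          + 15 * (long_meas.map (fun v =>
              prefix_counts.getD (PySem.Str.slice v none (some 4)) 0)).sum
        acc ++ [(score, some measure_id)]) []
    let best := PySem.List.maxD scored (fun t => t.1) ((0 : Int), (none : Option String))
    if 15 ≤ best.1 then best.2 else none

-- ===== PRECONDITION & SPEC =====
def Spec_fuzzy_match_measure_py (indication : String) (measures : List (List (String × String))) (out : Option String) : Prop := out = fuzzy_match_measure_py_alt indication measures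
instance (indication : String) (measures : List (List (String × String))) (out : Option String) : Decidable (Spec_fuzzy_match_measure_py indication measures out) := by unfold Spec_fuzzy_match_measure_py; infer_instance

-- ===== CLAIM (what is proved, stated in full; the proofs are below) =====
def Claim_equal_fuzzy_match_measure_py : Prop := ∀ (indication : String) (measures : List (List (String × String))), Dom_fuzzy_match_measure_py indication measures → Spec_fuzzy_match_measure_py indication measures (fuzzy_match_measure_py indication measures)

-- ===== LEMMAS AND PROOFS =====

def pvF : (Int × Option String) → (Int × Option String) → (Int × Option String) :=
  fun st y => if st.1 < y.1 then y else st
def pvPrefDict (iw : List String) : PySem.Dict String Int :=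
  (iw.filter (fun w => decide (PySem.Str.len w > 3))).foldl (fun d w =>
    d.insert (PySem.Str.slice w none (some 4)) (d.getD (PySem.Str.slice w none (some 4)) 0 + 1)) PySem.Dict.empty
def pvEntry (indication_lower : String) (indication_words : PySem.Set String)
    (pc : PySem.Dict String Int) (m : List (String × String)) : Option (Int × Option String) :=
  let measure_id := (PySem.Dict.mk m).getD "measureid" ""
  let measure_name := PySem.Str.lower ((PySem.Dict.mk m).getD "measure" "")
  if pvSkip.any (fun kw => PySem.Str.isIn kw measure_name) then none
  else
    let measure_words : PySem.Set String := PySem.Set.ofList (PySem.Str.split₀ measure_name)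
    some ((if PySem.Str.isIn (PySem.Str.lower measure_id) indication_lower then 100 else 0)
      + (if PySem.Str.isIn indication_lower measure_name then 80 else 0)
      + 20 * PySem.Set.len (PySem.Set.diff (PySem.Set.inter indication_words measure_words) pvStop)
      + 15 * (((PySem.Set.diff measure_words pvStop).filter (fun v => decide (PySem.Str.len v > 3))).map (fun v =>
          pc.getD (PySem.Str.slice v none (some 4)) 0)).sum,
      some measure_id)
theorem pvPrefDict_getD_gen (iw : List String) (d : PySem.Dict String Int) (p : String) :
    (iw.foldl (fun d w =>
      d.insert (PySem.Str.slice w none (some 4)) (d.getD (PySem.Str.slice w none (some 4)) 0 + 1)) d).getD p 0 =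
      d.getD p 0 + (iw.countP (fun w => PySem.Str.slice w none (some 4) == p) : Int) := by
  induction iw generalizing d with
  | nil => simp
  | cons w iw ih =>
    rw [List.foldl_cons, List.countP_cons, ih]
    by_cases hp : PySem.Str.slice w none (some 4) = p
    · subst hp
      rw [PySem.Dict.getD_insert_self]
      simp only [BEq.rfl, if_true]
      push_cast
      ring
    · rw [PySem.Dict.getD_insert_of_ne _ _ _ (Ne.symm hp)]
      have hb : (PySem.Str.slice w none (some 4) == p) = false := by simp [hp]
      simp only [hb]
      simp

theorem pvPrefDict_getD (iw : List String) (p : String) :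
    (pvPrefDict iw).getD p 0 =
      (iw.countP (fun w => decide (PySem.Str.len w > 3) && (PySem.Str.slice w none (some 4) == p)) : Int) := by
  rw [pvPrefDict, pvPrefDict_getD_gen]
  rw [List.countP_filter]
  have : (PySem.Dict.empty : PySem.Dict String Int).getD p 0 = 0 := by
    simp [PySem.Dict.getD, PySem.Dict.get?, PySem.Dict.empty]
  rw [this, zero_add]
  congr 2
  funext w
  rw [Bool.and_comm]
theorem pv_sum_swap {α β : Type} (l1 : List α) (l2 : List β) (g : α → β → Int) :
    (l1.map (fun a => (l2.map (fun b => g a b)).sum)).sum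
      = (l2.map (fun b => (l1.map (fun a => g a b)).sum)).sum := by
  induction l1 with
  | nil => simp
  | cons a l1 ih =>
    simp only [List.map_cons, List.sum_cons, ih]
    rw [← PySem.List.sum_map_add_int]
theorem pv_sum_filter {α : Type} (l : List α) (q : α → Bool) (f : α → Int) :
    ((l.filter q).map f).sum = (l.map (fun v => if q v = true then f v else 0)).sum := by
  induction l with
  | nil => rfl
  | cons x l ih =>
    by_cases hq : q x = true
    · simp [hq, ih]
    · simp [hq, ih]

theorem pv_score_eq (iw mw : List String) (s : Int) :
    iw.foldl (fun s ind_word =>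
      mw.foldl (fun s meas_word =>
        if PySem.Str.len ind_word > 3 ∧ PySem.Str.len meas_word > 3 then
          if PySem.Str.slice ind_word none (some 4) = PySem.Str.slice meas_word none (some 4) then s + 15 else s
        else s) s) s
    = s + 15 * ((mw.filter (fun v => decide (PySem.Str.len v > 3))).map (fun v =>
        (pvPrefDict iw).getD (PySem.Str.slice v none (some 4)) 0)).sum := by
  have hsum : ((mw.filter (fun v => decide (PySem.Str.len v > 3))).map (fun v =>
        (pvPrefDict iw).getD (PySem.Str.slice v none (some 4)) 0)).sum
      = (mw.map (fun v =>
        if PySem.Str.len v > 3 then (pvPrefDict iw).getD (PySem.Str.slice v none (some 4)) 0 else 0)).sum := by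
    rw [pv_sum_filter]
    simp only [decide_eq_true_eq]
  rw [hsum]
  have hinner : ∀ (w : String) (t : Int),
      mw.foldl (fun s meas_word =>
        if PySem.Str.len w > 3 ∧ PySem.Str.len meas_word > 3 then
          if PySem.Str.slice w none (some 4) = PySem.Str.slice meas_word none (some 4) then s + 15 else s
        else s) t
      = t + (mw.map (fun v =>
          if (PySem.Str.len w > 3 ∧ PySem.Str.len v > 3) ∧
             PySem.Str.slice w none (some 4) = PySem.Str.slice v none (some 4) then (15:Int) else 0)).sum := by
    intro w t
    have hf : (fun (s : Int) (meas_word : String) =>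
        if PySem.Str.len w > 3 ∧ PySem.Str.len meas_word > 3 then
          if PySem.Str.slice w none (some 4) = PySem.Str.slice meas_word none (some 4) then s + 15 else s
        else s)
      = fun (s : Int) (v : String) => s +
          (if (PySem.Str.len w > 3 ∧ PySem.Str.len v > 3) ∧
             PySem.Str.slice w none (some 4) = PySem.Str.slice v none (some 4) then (15:Int) else 0) := by
      funext s v
      by_cases h1 : PySem.Str.len w > 3 ∧ PySem.Str.len v > 3
      · rw [if_pos h1]
        by_cases h2 : PySem.Str.slice w none (some 4) = PySem.Str.slice v none (some 4)
        · rw [if_pos h2, if_pos ⟨h1, h2⟩]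
        · rw [if_neg h2, if_neg (fun h => h2 h.2), add_zero]
      · rw [if_neg h1, if_neg (fun h => h1 h.1), add_zero]
    rw [hf, PySem.List.foldl_add]
  have houter : (fun (t : Int) (w : String) =>
      mw.foldl (fun s meas_word =>
        if PySem.Str.len w > 3 ∧ PySem.Str.len meas_word > 3 then
          if PySem.Str.slice w none (some 4) = PySem.Str.slice meas_word none (some 4) then s + 15 else s
        else s) t)
      = fun (t : Int) (w : String) => t + (mw.map (fun v =>
          if (PySem.Str.len w > 3 ∧ PySem.Str.len v > 3) ∧
             PySem.Str.slice w none (some 4) = PySem.Str.slice v none (some 4) then (15:Int) else 0)).sum := by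
    funext t w; exact hinner w t
  rw [houter, PySem.List.foldl_add]
  congr 1
  rw [pv_sum_swap]
  have : ∀ v : String,
      (iw.map (fun w =>
        if (PySem.Str.len w > 3 ∧ PySem.Str.len v > 3) ∧
           PySem.Str.slice w none (some 4) = PySem.Str.slice v none (some 4) then (15:Int) else 0)).sum
      = 15 * (if PySem.Str.len v > 3 then (pvPrefDict iw).getD (PySem.Str.slice v none (some 4)) 0 else 0) := by
    intro v
    by_cases hv : PySem.Str.len v > 3
    · rw [if_pos hv, pvPrefDict_getD]
      have hm : (fun w =>
          if (PySem.Str.len w > 3 ∧ PySem.Str.len v > 3) ∧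
             PySem.Str.slice w none (some 4) = PySem.Str.slice v none (some 4) then (15:Int) else 0)
          = fun w => 15 * (if (decide (PySem.Str.len w > 3) &&
              (PySem.Str.slice w none (some 4) == PySem.Str.slice v none (some 4))) = true then (1:Int) else 0) := by
        funext w
        by_cases h1 : (PySem.Str.len w > 3 ∧ PySem.Str.len v > 3) ∧
            PySem.Str.slice w none (some 4) = PySem.Str.slice v none (some 4)
        · have hb : (decide (PySem.Str.len w > 3) &&
              (PySem.Str.slice w none (some 4) == PySem.Str.slice v none (some 4))) = true := by
            rw [Bool.and_eq_true, decide_eq_true_iff, beq_iff_eq]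
            exact ⟨h1.1.1, h1.2⟩
          rw [if_pos h1, if_pos hb]
          norm_num
        · have hb : ¬ ((decide (PySem.Str.len w > 3) &&
              (PySem.Str.slice w none (some 4) == PySem.Str.slice v none (some 4))) = true) := by
            rw [Bool.and_eq_true, decide_eq_true_iff, beq_iff_eq]
            exact fun hc => h1 ⟨⟨hc.1, hv⟩, hc.2⟩
          rw [if_neg h1, if_neg hb]
          norm_num
      rw [hm, List.sum_map_mul_left, PySem.List.sum_map_ite_one_zero]
    · rw [if_neg hv]
      have hm : (fun w =>
          if (PySem.Str.len w > 3 ∧ PySem.Str.len v > 3) ∧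
             PySem.Str.slice w none (some 4) = PySem.Str.slice v none (some 4) then (15:Int) else 0)
          = fun _ => (0:Int) := by
        funext w
        split_ifs with h1
        · exact absurd h1.1.2 hv
        · rfl
      rw [hm]
      simp
  calc (mw.map (fun v => (iw.map (fun w =>
        if (PySem.Str.len w > 3 ∧ PySem.Str.len v > 3) ∧
           PySem.Str.slice w none (some 4) = PySem.Str.slice v none (some 4) then (15:Int) else 0)).sum)).sum
      = (mw.map (fun v => 15 * (if PySem.Str.len v > 3 then (pvPrefDict iw).getD (PySem.Str.slice v none (some 4)) 0 else 0))).sum := by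
        exact congrArg List.sum (List.map_congr_left (fun v _ => this v))
    _ = _ := by rw [List.sum_map_mul_left]
theorem pvEntry_nonneg (il : String) (iw : PySem.Set String) (pc : PySem.Dict String Int)
    (hpc : ∀ p, 0 ≤ pc.getD p 0) (m : List (String × String))
    (y : Int × Option String) (h : pvEntry il iw pc m = some y) :
    0 ≤ y.1 := by
  unfold pvEntry at h
  simp only [] at h
  by_cases hskip : pvSkip.any (fun kw => PySem.Str.isIn kw (PySem.Str.lower ((PySem.Dict.mk m).getD "measure" ""))) = true
  · rw [if_pos hskip] at h; cases h
  · rw [if_neg hskip] at h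
    have hy := Option.some_inj.mp h
    rw [← hy]
    have h1 : (0:Int) ≤ PySem.Set.len (PySem.Set.diff
        (PySem.Set.inter iw (PySem.Set.ofList (PySem.Str.split₀ (PySem.Str.lower ((PySem.Dict.mk m).getD "measure" ""))))) pvStop) := by
      simp [PySem.Set.len]
    have h2 : (0:Int) ≤ (((PySem.Set.diff (PySem.Set.ofList (PySem.Str.split₀ (PySem.Str.lower ((PySem.Dict.mk m).getD "measure" "")))) pvStop).filter (fun v => decide (PySem.Str.len v > 3))).map (fun v =>
          pc.getD (PySem.Str.slice v none (some 4)) 0)).sum := by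
      apply List.sum_nonneg
      intro x hx
      rcases List.mem_map.mp hx with ⟨v, _, rfl⟩
      exact hpc _
    simp only []
    split_ifs <;> omega
theorem pvPrefDict_getD_nonneg (iw : List String) (p : String) :
    0 ≤ (pvPrefDict iw).getD p 0 := by
  rw [pvPrefDict_getD]
  positivity
theorem pv_max?_cons (xs : List (Int × Option String)) (x : Int × Option String) :
    PySem.List.max? (x :: xs) (fun t => t.1) = some (xs.foldl pvF x) := by
  induction xs generalizing x with
  | nil => rfl
  | cons y ys ih =>
    have hstep : PySem.List.max? (x :: y :: ys) (fun t => t.1)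
        = PySem.List.max? (pvF x y :: ys) (fun t => t.1) := by
      unfold PySem.List.max?
      simp only [List.foldl_cons]
      congr 1
      unfold pvF
      split_ifs <;> rfl
    rw [hstep, ih]
    simp only [List.foldl_cons]
theorem pv_eq_or_fix (L : List (Int × Option String)) (a b : Int × Option String)
    (hab : a.1 = b.1) :
    (L.foldl pvF a = L.foldl pvF b) ∨ (L.foldl pvF a = a ∧ L.foldl pvF b = b) := by
  induction L generalizing a b with
  | nil => right; exact ⟨rfl, rfl⟩
  | cons x L ih =>
    simp only [List.foldl_cons]
    by_cases hx : a.1 < x.1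
    · have h1 : pvF a x = x := by unfold pvF; rw [if_pos hx]
      have h2 : pvF b x = x := by unfold pvF; rw [if_pos (hab ▸ hx)]
      rw [h1, h2]; left; rfl
    · have h1 : pvF a x = a := by unfold pvF; rw [if_neg hx]
      have h2 : pvF b x = b := by unfold pvF; rw [if_neg (hab ▸ hx)]
      rw [h1, h2]; exact ih a b hab
theorem pv_select (L : List (Int × Option String)) (hL : ∀ y ∈ L, 0 ≤ y.1) :
    (if 15 ≤ (L.foldl pvF ((0 : Int), (none : Option String))).1
      then (L.foldl pvF ((0 : Int), (none : Option String))).2 else none)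
    = (if 15 ≤ (PySem.List.maxD L (fun t => t.1) ((0 : Int), (none : Option String))).1
      then (PySem.List.maxD L (fun t => t.1) ((0 : Int), (none : Option String))).2 else none) := by
  cases L with
  | nil => rfl
  | cons x xs =>
    have hmax : PySem.List.maxD (x :: xs) (fun t => t.1) ((0 : Int), (none : Option String))
        = xs.foldl pvF x := by
      unfold PySem.List.maxD
      rw [pv_max?_cons xs x]
      rfl
    rw [hmax]
    simp only [List.foldl_cons]
    by_cases hx0 : (0 : Int) < x.1
    · have : pvF ((0 : Int), (none : Option String)) x = x := by
        unfold pvF; rw [if_pos hx0]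
      rw [this]
    · have hx1 : x.1 = 0 := le_antisymm (not_lt.mp hx0) (hL x (List.mem_cons_self))
      have : pvF ((0 : Int), (none : Option String)) x = ((0 : Int), (none : Option String)) := by
        unfold pvF; rw [if_neg hx0]
      rw [this]
      rcases pv_eq_or_fix xs ((0 : Int), (none : Option String)) x (by simp [hx1]) with h | ⟨h1, h2⟩
      · rw [h]
      · rw [h1, h2]
        rw [if_neg (by norm_num), if_neg (by rw [hx1]; norm_num)]
theorem pvA_loop (il : String) (iw : PySem.Set String) (ms : List (List (String × String)))
    (st : Int × Option String) :
    ms.foldl (fun (st : Int × Option String) m =>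
      let measure_id := (PySem.Dict.mk m).getD "measureid" ""
      let measure_name := PySem.Str.lower ((PySem.Dict.mk m).getD "measure" "")
      if pvSkip.any (fun kw => PySem.Str.isIn kw measure_name) then st
      else
        let score0 : Int := if PySem.Str.isIn (PySem.Str.lower measure_id) il then 100 else 0
        let score1 : Int := if PySem.Str.isIn il measure_name then score0 + 80 else score0
        let measure_words : PySem.Set String := PySem.Set.ofList (PySem.Str.split₀ measure_name)
        let meaningful_common := PySem.Set.diff (PySem.Set.inter iw measure_words) pvStop
        let score2 : Int := score1 + (PySem.Set.len meaningful_common) * 20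
        let score : Int := (PySem.Set.diff iw pvStop).foldl (fun s ind_word =>
            (PySem.Set.diff measure_words pvStop).foldl (fun s meas_word =>
              if PySem.Str.len ind_word > 3 ∧ PySem.Str.len meas_word > 3 then
                if PySem.Str.slice ind_word none (some 4) = PySem.Str.slice meas_word none (some 4) then s + 15 else s
              else s) s) score2
        if st.1 < score then (score, some measure_id) else st) st
    = (ms.filterMap (pvEntry il iw (pvPrefDict (PySem.Set.diff iw pvStop)))).foldl pvF st := by
  induction ms generalizing st with
  | nil => rfl
  | cons m ms ih =>
    simp only [List.foldl_cons, List.filterMap_cons]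
    by_cases hskip : pvSkip.any (fun kw => PySem.Str.isIn kw (PySem.Str.lower ((PySem.Dict.mk m).getD "measure" ""))) = true
    · rw [show pvEntry il iw (pvPrefDict (PySem.Set.diff iw pvStop)) m = none from by
        unfold pvEntry; simp only []; rw [if_pos hskip]]
      simp only []
      rw [if_pos hskip, ih]
    · have hentry : pvEntry il iw (pvPrefDict (PySem.Set.diff iw pvStop)) m =
        some ((if PySem.Str.isIn (PySem.Str.lower ((PySem.Dict.mk m).getD "measureid" "")) il then 100 else 0)
          + (if PySem.Str.isIn il (PySem.Str.lower ((PySem.Dict.mk m).getD "measure" "")) then 80 else 0)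
          + 20 * PySem.Set.len (PySem.Set.diff (PySem.Set.inter iw (PySem.Set.ofList (PySem.Str.split₀ (PySem.Str.lower ((PySem.Dict.mk m).getD "measure" ""))))) pvStop)
          + 15 * (((PySem.Set.diff (PySem.Set.ofList (PySem.Str.split₀ (PySem.Str.lower ((PySem.Dict.mk m).getD "measure" "")))) pvStop).filter (fun v => decide (PySem.Str.len v > 3))).map (fun v =>
              (pvPrefDict (PySem.Set.diff iw pvStop)).getD (PySem.Str.slice v none (some 4)) 0)).sum,
          some ((PySem.Dict.mk m).getD "measureid" "")) := by
        unfold pvEntry; simp only []; rw [if_neg hskip]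
      rw [hentry]
      simp only []
      rw [if_neg hskip, List.foldl_cons]
      rw [pv_score_eq]
      have harith : ((if PySem.Str.isIn il (PySem.Str.lower ((PySem.Dict.mk m).getD "measure" "")) then
            (if PySem.Str.isIn (PySem.Str.lower ((PySem.Dict.mk m).getD "measureid" "")) il then (100:Int) else 0) + 80
          else (if PySem.Str.isIn (PySem.Str.lower ((PySem.Dict.mk m).getD "measureid" "")) il then (100:Int) else 0))
          + PySem.Set.len (PySem.Set.diff (PySem.Set.inter iw (PySem.Set.ofList (PySem.Str.split₀ (PySem.Str.lower ((PySem.Dict.mk m).getD "measure" ""))))) pvStop) * 20)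
          + 15 * (((PySem.Set.diff (PySem.Set.ofList (PySem.Str.split₀ (PySem.Str.lower ((PySem.Dict.mk m).getD "measure" "")))) pvStop).filter (fun v => decide (PySem.Str.len v > 3))).map (fun v =>
              (pvPrefDict (PySem.Set.diff iw pvStop)).getD (PySem.Str.slice v none (some 4)) 0)).sum
        = (if PySem.Str.isIn (PySem.Str.lower ((PySem.Dict.mk m).getD "measureid" "")) il then (100:Int) else 0)
          + (if PySem.Str.isIn il (PySem.Str.lower ((PySem.Dict.mk m).getD "measure" "")) then (80:Int) else 0)
          + 20 * PySem.Set.len (PySem.Set.diff (PySem.Set.inter iw (PySem.Set.ofList (PySem.Str.split₀ (PySem.Str.lower ((PySem.Dict.mk m).getD "measure" ""))))) pvStop)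
          + 15 * (((PySem.Set.diff (PySem.Set.ofList (PySem.Str.split₀ (PySem.Str.lower ((PySem.Dict.mk m).getD "measure" "")))) pvStop).filter (fun v => decide (PySem.Str.len v > 3))).map (fun v =>
              (pvPrefDict (PySem.Set.diff iw pvStop)).getD (PySem.Str.slice v none (some 4)) 0)).sum := by
        split_ifs <;> ring
      rw [harith, ih]
      rfl
theorem pvB_scored (il : String) (iw : PySem.Set String) (pc : PySem.Dict String Int)
    (ms : List (List (String × String))) (acc : List (Int × Option String)) :
    ms.foldl (fun acc m =>
      let measure_id := (PySem.Dict.mk m).getD "measureid" ""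
      let measure_name := PySem.Str.lower ((PySem.Dict.mk m).getD "measure" "")
      if pvSkip.any (fun kw => PySem.Str.isIn kw measure_name) then acc
      else
        let measure_words : PySem.Set String := PySem.Set.ofList (PySem.Str.split₀ measure_name)
        let long_meas := (PySem.Set.diff measure_words pvStop).filter (fun v => decide (PySem.Str.len v > 3))
        let score : Int :=
          (if PySem.Str.isIn (PySem.Str.lower measure_id) il then 100 else 0)
          + (if PySem.Str.isIn il measure_name then 80 else 0)
          + 20 * PySem.Set.len (PySem.Set.diff (PySem.Set.inter iw measure_words) pvStop)
          + 15 * (long_meas.map (fun v =>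
              pc.getD (PySem.Str.slice v none (some 4)) 0)).sum
        acc ++ [(score, some measure_id)]) acc
    = acc ++ ms.filterMap (pvEntry il iw pc) := by
  induction ms generalizing acc with
  | nil => simp
  | cons m ms ih =>
    simp only [List.foldl_cons, List.filterMap_cons]
    by_cases hskip : pvSkip.any (fun kw => PySem.Str.isIn kw (PySem.Str.lower ((PySem.Dict.mk m).getD "measure" ""))) = true
    · rw [show pvEntry il iw pc m = none from by
        unfold pvEntry; simp only []; rw [if_pos hskip]]
      simp only []
      rw [if_pos hskip, ih]
    · have hentry : pvEntry il iw pc m =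
        some ((if PySem.Str.isIn (PySem.Str.lower ((PySem.Dict.mk m).getD "measureid" "")) il then 100 else 0)
          + (if PySem.Str.isIn il (PySem.Str.lower ((PySem.Dict.mk m).getD "measure" "")) then 80 else 0)
          + 20 * PySem.Set.len (PySem.Set.diff (PySem.Set.inter iw (PySem.Set.ofList (PySem.Str.split₀ (PySem.Str.lower ((PySem.Dict.mk m).getD "measure" ""))))) pvStop)
          + 15 * (((PySem.Set.diff (PySem.Set.ofList (PySem.Str.split₀ (PySem.Str.lower ((PySem.Dict.mk m).getD "measure" "")))) pvStop).filter (fun v => decide (PySem.Str.len v > 3))).map (fun v =>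
              pc.getD (PySem.Str.slice v none (some 4)) 0)).sum,
          some ((PySem.Dict.mk m).getD "measureid" "")) := by
        unfold pvEntry; simp only []; rw [if_neg hskip]
      rw [hentry]
      simp only []
      rw [if_neg hskip, ih]
      simp

-- ===== VERDICT (by name: the statement is the Claim_ definition above) =====
theorem fuzzy_match_measure_py_spec : Claim_equal_fuzzy_match_measure_py := by
  intro indication measures _
  unfold Spec_fuzzy_match_measure_py fuzzy_match_measure_py fuzzy_match_measure_py_alt
  by_cases hg : indication = "" ∨ measures = []
  · rw [if_pos hg, if_pos hg]
  · rw [if_neg hg, if_neg hg]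
    simp only []
    have hA := pvA_loop (PySem.Str.lower indication)
      (PySem.Set.ofList (PySem.Str.split₀ (PySem.Str.lower indication))) measures
      ((0 : Int), (none : Option String))
    simp only [] at hA
    rw [hA]
    rw [show (((PySem.Set.diff (PySem.Set.ofList (PySem.Str.split₀ (PySem.Str.lower indication))) pvStop).filter (fun w => decide (PySem.Str.len w > 3))).foldl (fun d w =>
        d.insert (PySem.Str.slice w none (some 4)) (d.getD (PySem.Str.slice w none (some 4)) 0 + 1)) PySem.Dict.empty)
      = pvPrefDict (PySem.Set.diff (PySem.Set.ofList (PySem.Str.split₀ (PySem.Str.lower indication))) pvStop) from rfl]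
    have hB := pvB_scored (PySem.Str.lower indication)
      (PySem.Set.ofList (PySem.Str.split₀ (PySem.Str.lower indication)))
      (pvPrefDict (PySem.Set.diff (PySem.Set.ofList (PySem.Str.split₀ (PySem.Str.lower indication))) pvStop))
      measures []
    simp only [] at hB
    rw [hB, List.nil_append]
    apply pv_select
    intro y hy
    rcases List.mem_filterMap.mp hy with ⟨m, _, hm⟩
    exact pvEntry_nonneg _ _ _ (fun p => pvPrefDict_getD_nonneg _ p) m y hm
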